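-- pv_equiv track=rewrite | github.com/mataharian/python | Materi/fungsi_list.py | MinList
-- ===== SOURCE A (Python) =====
-- def IsEmpty(L) :
--   if L == [] :
--     return True
--   else :
--     return False
--
-- def FirstElement(L) :
--   if not IsEmpty(L) :
--     return L[0]
--
-- def Tail(L) :
--   if not IsEmpty(L) :
--     return L[1:]
--
-- def MinList(L) :
--   if IsEmpty(L) :
--     return 0
--   else :
--     if FirstElement(L) < MinList(Tail(L)) :
--       return FirstElement(L)
--     else :
--       return MinList(Tail(L))
-- ===== SOURCE B (Python) =====
-- def MinList(L):
--   m = 0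
--   for x in L:
--     if x < m:
--       m = x
--   return m
-- ===== Notes on version B (the rewrite author's own statement) =====
-- stated objective: faster
-- what changed: Replaces the exponential double-recursive helper chain with a single iterative pass keeping a running minimum initialized to 0.
import Mathlib
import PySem

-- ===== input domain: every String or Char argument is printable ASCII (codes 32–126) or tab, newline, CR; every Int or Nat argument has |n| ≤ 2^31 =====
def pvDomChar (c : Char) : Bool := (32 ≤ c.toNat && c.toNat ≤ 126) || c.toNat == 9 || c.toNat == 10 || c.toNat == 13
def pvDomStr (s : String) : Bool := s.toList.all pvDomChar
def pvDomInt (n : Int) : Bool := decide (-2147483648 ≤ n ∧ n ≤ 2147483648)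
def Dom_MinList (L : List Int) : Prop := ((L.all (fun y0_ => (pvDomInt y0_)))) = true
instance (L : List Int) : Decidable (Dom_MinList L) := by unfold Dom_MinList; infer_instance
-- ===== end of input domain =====

-- B iterates a running-minimum accumulator instead of A's exponential double recursion; same value everywhere.

-- ===== PORT A =====
def pyIsEmpty (L : List Int) : Bool := L == []

-- FirstElement/Tail return None on an empty list in Python; Option here (only used when nonempty)
def pyFirstElement (L : List Int) : Option Int :=
  if !(pyIsEmpty L) then L.head? else none

def pyTail (L : List Int) : Option (List Int) :=
  if !(pyIsEmpty L) then some (L.drop 1) else none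

def MinList (L : List Int) : Int :=
  match L with
  | [] => 0
  | h :: t =>
    -- FirstElement/Tail always succeed here (list nonempty), so the options are `some`
    if ((pyFirstElement (h :: t)).getD h) < MinList ((pyTail (h :: t)).getD t) then
      (pyFirstElement (h :: t)).getD h
    else
      MinList ((pyTail (h :: t)).getD t)

-- ===== PORT B =====
def MinList_alt (L : List Int) : Int :=
  L.foldl (fun m x => if x < m then x else m) 0

-- ===== PRECONDITION & SPEC =====
def Spec_MinList (L : List Int) (out : Int) : Prop := out = MinList_alt L
instance (L : List Int) (out : Int) : Decidable (Spec_MinList L out) := by unfold Spec_MinList; infer_instance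

-- ===== CLAIM (what is proved, stated in full; the proofs are below) =====
def Claim_equal_MinList : Prop := ∀ (L : List Int), Dom_MinList L → Spec_MinList L (MinList L)

-- ===== LEMMAS AND PROOFS =====
theorem MinList_cons (h : Int) (t : List Int) :
    MinList (h :: t) = if h < MinList t then h else MinList t := rfl

theorem MinList_nonpos (L : List Int) : MinList L ≤ 0 := by
  induction L with
  | nil => simp [MinList]
  | cons h t ih => rw [MinList_cons]; split_ifs <;> omega

theorem fold_min (L : List Int) : ∀ m : Int, m ≤ 0 →
    L.foldl (fun m x => if x < m then x else m) m = min m (MinList L) := by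
  induction L with
  | nil => intro m hm; simp [MinList]; omega
  | cons h t ih =>
    intro m hm
    rw [MinList_cons]
    simp only [List.foldl]
    rw [ih _ (by split_ifs <;> omega)]
    split_ifs <;> omega

-- ===== VERDICT (by name: the statement is the Claim_ definition above) =====
theorem MinList_spec : Claim_equal_MinList := by
  intro L _
  unfold Spec_MinList MinList_alt
  rw [fold_min L 0 le_rfl]
  have := MinList_nonpos L
  omega
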